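-- pv_equiv track=rewrite | github.com/FARRUXBEKAI/Abramyan-misollari-yechimi | 13-dars Funksiya/13-dars Funksiya.py | DigitCountSum
-- ===== SOURCE A (Python) =====
-- def DigitCountSum(x):
--     s = 0
--     k = 0
--     while x > 0:
--         k += 1
--         s += x%10
--         x //= 10
--     return k,s
-- ===== SOURCE B (Python) =====
-- def DigitCountSum(x):
--     if x <= 0:
--         return 0, 0
--     s = str(x)
--     return len(s), sum(ord(c) - 48 for c in s)
-- ===== Notes on version B (the rewrite author's own statement) =====
-- stated objective: idiomatic
-- what changed: B reads the digits from the decimal string str(x) (length and a sum over its characters) instead of A's arithmetic while-loop extracting digits with % and //.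
import Mathlib
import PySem

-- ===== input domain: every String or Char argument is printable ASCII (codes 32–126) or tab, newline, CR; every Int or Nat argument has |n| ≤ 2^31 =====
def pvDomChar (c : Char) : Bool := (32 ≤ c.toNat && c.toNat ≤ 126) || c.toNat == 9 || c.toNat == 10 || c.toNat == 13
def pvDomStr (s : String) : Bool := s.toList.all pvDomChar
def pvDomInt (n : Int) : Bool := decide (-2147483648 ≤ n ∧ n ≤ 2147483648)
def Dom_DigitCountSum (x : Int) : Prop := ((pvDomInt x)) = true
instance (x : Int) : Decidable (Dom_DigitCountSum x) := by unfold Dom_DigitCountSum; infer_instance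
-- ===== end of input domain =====

-- B counts/sums the digits via the decimal string str(x) instead of A's %/// extraction loop (idiomatic, same cost).

-- ===== PORT A =====
-- the while loop of A, carried as a recursion over the loop state (x, k, s)
def DigitCountSumLoop (x k s : Int) : Int × Int :=
  if 0 < x then
    DigitCountSumLoop (PySem.Int.floordiv x 10) (k + 1) (s + PySem.Int.mod x 10)
  else (k, s)
termination_by x.toNat
decreasing_by
  simp only [PySem.Int.floordiv, Int.fdiv_eq_ediv_of_nonneg _ (by norm_num : (0:Int) ≤ 10)]
  omega

def DigitCountSum (x : Int) : Int × Int :=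
  DigitCountSumLoop x 0 0

-- ===== PORT B =====
def DigitCountSum_alt (x : Int) : Int × Int :=
  if x ≤ 0 then (0, 0)
  else
    let s := PySem.Int.toStr x
    (PySem.Str.len s, s.toList.foldl (fun a c => a + ((c.toNat : Int) - 48)) 0)

-- ===== PRECONDITION & SPEC =====
def Spec_DigitCountSum (x : Int) (out : Int × Int) : Prop := out = DigitCountSum_alt x
instance (x : Int) (out : Int × Int) : Decidable (Spec_DigitCountSum x out) := by unfold Spec_DigitCountSum; infer_instance

-- ===== CLAIM (what is proved, stated in full; the proofs are below) =====
def Claim_equal_DigitCountSum : Prop := ∀ (x : Int), Dom_DigitCountSum x → Spec_DigitCountSum x (DigitCountSum x)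

-- ===== LEMMAS AND PROOFS =====

-- char value of a decimal digit char
lemma digitChar_val {m : Nat} (h : m < 10) : ((Nat.digitChar m).toNat : Int) = m + 48 := by
  interval_cases m <;> decide

-- toDigitsCore with enough fuel ignores the fuel and appends to the accumulator
lemma toDigitsCore_eq_append (n : Nat) : ∀ f ds, n < f →
    Nat.toDigitsCore 10 f n ds = Nat.toDigits 10 n ++ ds := by
  induction n using Nat.strong_induction_on with
  | _ n ih =>
    intro f ds hf
    match f, hf with
    | f + 1, _ =>
      by_cases h0 : n / 10 = 0
      · simp [Nat.toDigitsCore, Nat.toDigits, h0]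
      · have h10 : 10 ≤ n := by omega
        have hlt : n / 10 < n := Nat.div_lt_self (by omega) (by omega)
        simp only [Nat.toDigitsCore, Nat.toDigits, h0]
        rw [ih (n / 10) hlt f _ (by omega), ih (n / 10) hlt n _ (by omega)]
        simp

lemma toDigits_split {n : Nat} (h : 10 ≤ n) :
    Nat.toDigits 10 n = Nat.toDigits 10 (n / 10) ++ [Nat.digitChar (n % 10)] := by
  have h0 : n / 10 ≠ 0 := by omega
  conv_lhs => rw [Nat.toDigits]
  simp only [Nat.toDigitsCore, h0]
  exact toDigitsCore_eq_append (n / 10) n _ (by omega)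

lemma toDigits_small {n : Nat} (h : n < 10) : Nat.toDigits 10 n = [Nat.digitChar n] := by
  have h0 : n / 10 = 0 := by omega
  rw [Nat.toDigits]
  simp [Nat.toDigitsCore, h0, Nat.mod_eq_of_lt h]

-- the char-sum fold pulled out of the accumulator
lemma foldl_digit_sum (cs : List Char) : ∀ init : Int,
    cs.foldl (fun a c => a + ((c.toNat : Int) - 48)) init
      = init + (cs.map (fun c => ((c.toNat : Int) - 48))).sum := by
  induction cs with
  | nil => simp
  | cons c cs ih => intro init; simp [List.foldl_cons, ih]; ring

-- the loop of A computes length and char-sum of the decimal digits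
lemma loop_eq_digits (n : Nat) : ∀ k s : Int, 0 < n →
    DigitCountSumLoop n k s =
      (k + (Nat.toDigits 10 n).length,
       s + ((Nat.toDigits 10 n).map (fun c => ((c.toNat : Int) - 48))).sum) := by
  induction n using Nat.strong_induction_on with
  | _ n ih =>
    intro k s hn
    rw [DigitCountSumLoop.eq_def]
    have hpos : (0 : Int) < (n : Int) := by exact_mod_cast hn
    rw [if_pos hpos]
    have hfd : PySem.Int.floordiv (n : Int) 10 = ((n / 10 : Nat) : Int) := by
      simp [PySem.Int.floordiv, Int.fdiv_eq_ediv_of_nonneg _ (by norm_num : (0:Int) ≤ 10)]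
    have hmd : PySem.Int.mod (n : Int) 10 = ((n % 10 : Nat) : Int) := by
      simp [PySem.Int.mod, Int.fmod_eq_emod]
    rw [hfd, hmd]
    by_cases hsmall : n < 10
    · have h0 : n / 10 = 0 := by omega
      rw [h0]
      rw [DigitCountSumLoop.eq_def]
      rw [if_neg (by norm_num)]
      rw [toDigits_small hsmall]
      have := digitChar_val hsmall
      simp [this]
      omega
    · have h10 : 10 ≤ n := by omega
      have hlt : n / 10 < n := Nat.div_lt_self (by omega) (by omega)
      rw [ih (n / 10) hlt _ _ (by omega), toDigits_split h10]
      have := digitChar_val (Nat.mod_lt n (by omega) : n % 10 < 10)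
      simp [this]
      constructor
      · ring
      · ring

-- ===== VERDICT (by name: the statement is the Claim_ definition above) =====
theorem DigitCountSum_spec : Claim_equal_DigitCountSum := by
  intro x _
  unfold Spec_DigitCountSum DigitCountSum DigitCountSum_alt
  by_cases hx : x ≤ 0
  · rw [if_pos hx, DigitCountSumLoop.eq_def, if_neg (by omega)]
  · rw [if_neg hx]
    have hx0 : 0 < x := by omega
    have hn : (0 : Nat) < x.toNat := by omega
    have hcast : ((x.toNat : Nat) : Int) = x := by omega
    have htc : (PySem.Int.toStr x).toList = Nat.toDigits 10 x.toNat := by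
      rw [PySem.Int.toList_toStr, PySem.Int.toChars, if_neg (by omega)]
    conv_lhs => rw [← hcast]
    rw [loop_eq_digits x.toNat 0 0 hn]
    simp [PySem.Str.len, htc, foldl_digit_sum]
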